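-- pv_equiv track=rewrite | github.com/nilin/cancellations | examplefunctions.py | H_coefficients
-- ===== SOURCE A (Python) =====
-- def H_coefficients(n):
-- 	if n==0:
-- 		return [[1]]
-- 	else:
-- 		A=H_coefficients(n-1)
-- 		a1=A[-1]+2*[0]
-- 		a=[-a1[1]]
-- 		for k in range(1,n+1):
-- 			a.append(2*a1[k-1]-(k+1)*a1[k+1])
-- 		A.append(a)
-- 		return A
-- ===== SOURCE B (Python) =====
-- def H_coefficients(n):
--     # Iterative three-term recurrence H_i = 2x*H_{i-1} - 2*(i-1)*H_{i-2},
--     # keeping the two most recent rows instead of recursing with the derivative.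
--     if n <= 0:
--         return [[1]]
--     rows = [[1], [0, 2]]
--     prev2, prev1 = [1], [0, 2]
--     for i in range(2, n + 1):
--         new = [(2 * prev1[k - 1] if k >= 1 else 0)
--                - 2 * (i - 1) * (prev2[k] if k < len(prev2) else 0)
--                for k in range(i + 1)]
--         rows.append(new)
--         prev2, prev1 = prev1, new
--     return rows
-- ===== Notes on version B (the rewrite author's own statement) =====
-- stated objective: simpler
-- what changed: Replaces A's top-down recursion, which rebuilds each row from the previous row via derivative-style coefficient shifts, by an iterative loop over the classic three-term Hermite recurrence that keeps only the two most recent rows.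
import Mathlib
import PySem

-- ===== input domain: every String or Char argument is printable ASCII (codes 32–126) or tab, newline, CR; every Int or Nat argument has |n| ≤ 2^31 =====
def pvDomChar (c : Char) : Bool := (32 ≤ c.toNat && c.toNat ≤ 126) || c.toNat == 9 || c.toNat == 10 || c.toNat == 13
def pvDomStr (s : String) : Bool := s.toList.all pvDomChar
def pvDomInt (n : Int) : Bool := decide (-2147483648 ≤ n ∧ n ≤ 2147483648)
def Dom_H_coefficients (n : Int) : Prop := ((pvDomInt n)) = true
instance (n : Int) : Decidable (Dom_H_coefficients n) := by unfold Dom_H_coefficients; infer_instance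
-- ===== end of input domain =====

-- B replaces A's recursion on n with its derivative-based row step by an iterative
-- loop using the classic three-term recurrence H_i = 2x·H_{i-1} − 2·(i−1)·H_{i-2},
-- keeping only the two most recent rows (objective: simpler/iterative; same cost).

-- ===== PORT A =====
-- A recurses with n-1 until n == 0; on negative n the Python recursion never
-- reaches the base case (RecursionError), excluded by Pre_. We recurse on n.toNat.
-- All Python list indexings in A are in range on the admitted inputs, so
-- pyGetD's default 0 is never consulted.
def H_coefficientsAux : Nat → List (List Int)
  | 0 => [[1]]
  | n+1 =>
    let A := H_coefficientsAux n
    let a1 := A.getLastD [] ++ [0, 0]                    -- a1 = A[-1] + 2*[0]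
    let a0 : List Int := [-(PySem.List.pyGetD a1 1 0)]   -- a = [-a1[1]]
    let a := (PySem.List.pyRange 1 ((n : Int) + 2) 1).foldl
      (fun a k => a ++ [2 * PySem.List.pyGetD a1 (k - 1) 0
                        - (k + 1) * PySem.List.pyGetD a1 (k + 1) 0]) a0
    A ++ [a]

def H_coefficients (n : Int) : List (List Int) := H_coefficientsAux n.toNat

-- ===== PORT B =====
-- loop body of Source B: state = (rows, prev2, prev1)
def altStep (st : List (List Int) × List Int × List Int) (i : Int) :
    List (List Int) × List Int × List Int :=
  let new := (PySem.List.pyRange 0 (i + 1) 1).map (fun k =>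
    (if 1 ≤ k then 2 * PySem.List.pyGetD st.2.2 (k - 1) 0 else 0)
    - 2 * (i - 1) * (if k < (st.2.1.length : Int) then PySem.List.pyGetD st.2.1 k 0 else 0))
  (st.1 ++ [new], st.2.2, new)

def H_coefficients_alt (n : Int) : List (List Int) :=
  if n ≤ 0 then [[1]]
  else
    ((PySem.List.pyRange 2 (n + 1) 1).foldl altStep
      (([[1], [0, 2]], [1], [0, 2]) : List (List Int) × List Int × List Int)).1

-- ===== PRECONDITION & SPEC =====
-- Pre_ excludes exactly the negative n, on which Python A recurses without reaching
-- the base case and raises RecursionError.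
def Pre_H_coefficients (n : Int) : Prop := 0 ≤ n
instance (n : Int) : Decidable (Pre_H_coefficients n) := by unfold Pre_H_coefficients; infer_instance
def pvWitness_H_coefficients : Int := (3)


def Spec_H_coefficients (n : Int) (out : List (List Int)) : Prop := out = H_coefficients_alt n
instance (n : Int) (out : List (List Int)) : Decidable (Spec_H_coefficients n out) := by unfold Spec_H_coefficients; infer_instance

-- ===== CLAIM (what is proved, stated in full; the proofs are below) =====
def Claim_equal_H_coefficients : Prop := ∀ (n : Int), Dom_H_coefficients n → Pre_H_coefficients n → Spec_H_coefficients n (H_coefficients n)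

-- ===== LEMMAS AND PROOFS =====

-- The canonical coefficient table: hrow n = coefficients of H_n (physicists'),
-- written with A's derivative-based row formula.
def hrow : Nat → List Int
  | 0 => [1]
  | n+1 => (List.range (n + 2)).map (fun k =>
      (if 1 ≤ k then 2 * (hrow n).getD (k - 1) 0 else 0)
      - ((k : Int) + 1) * (hrow n).getD (k + 1) 0)

def c (n k : Nat) : Int := (hrow n).getD k 0

theorem length_hrow (n : Nat) : (hrow n).length = n + 1 := by
  cases n <;> simp [hrow]

theorem c_of_big {n k : Nat} (h : n < k) : c n k = 0 := by
  unfold c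
  apply List.getD_eq_default
  rw [length_hrow]; omega

theorem c_succ (n k : Nat) :
    c (n+1) k = (if 1 ≤ k then 2 * c n (k - 1) else 0) - ((k : Int) + 1) * c n (k + 1) := by
  by_cases hk : k < n + 2
  · show (hrow (n+1)).getD k 0 = _
    rw [show hrow (n+1) = (List.range (n + 2)).map (fun k =>
        (if 1 ≤ k then 2 * c n (k - 1) else 0) - ((k : Int) + 1) * c n (k + 1)) from rfl]
    rw [List.getD_eq_getElem _ _ (by simpa using hk)]
    simp
  · rw [c_of_big (by omega)]
    have h1 : c n (k - 1) = 0 := c_of_big (by omega)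
    have h2 : c n (k + 1) = 0 := c_of_big (by omega)
    rw [h1, h2]; simp

theorem c_succ_zero (n : Nat) : c (n+1) 0 = - c n 1 := by
  have := c_succ n 0; simpa using this

theorem c_succ_pos (n k : Nat) :
    c (n+1) (k+1) = 2 * c n k - ((k : Int) + 2) * c n (k + 2) := by
  have h := c_succ n (k+1)
  simp at h
  rw [h]; ring_nf

-- Hermite ODE identity on coefficients: (k+1)(k+2)·c n (k+2) = 2(k−n)·c n k.
theorem hermite_ode (n : Nat) : ∀ k : Nat,
    ((k : Int) + 1) * ((k : Int) + 2) * c n (k + 2) = 2 * ((k : Int) - (n : Int)) * c n k := by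
  induction n with
  | zero =>
    intro k
    rw [c_of_big (by omega)]
    cases k with
    | zero => simp
    | succ j => rw [c_of_big (by omega)]; ring
  | succ n IH =>
    intro k
    cases k with
    | zero =>
      have h2 := c_succ_pos n 1
      have h0 := c_succ_zero n
      have hIH := IH 1
      rw [show (0:Nat)+2 = 1+1 by rfl, h2, h0]
      push_cast at hIH ⊢
      linear_combination -hIH
    | succ j =>
      have hL := c_succ_pos n (j + 2)
      have hR := c_succ_pos n j
      have hIH1 := IH (j + 2)
      have hIH2 := IH j
      rw [show j+1+2 = (j+2)+1 by omega, hL, hR]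
      push_cast at hIH1 hIH2 ⊢
      linear_combination (-((j:Int)+2)) * hIH1 + 2 * hIH2

-- derivative identity: (k+1)·c (n+1) (k+1) = 2(n+1)·c n k   (H_{n+1}' = 2(n+1)H_n)
theorem hermite_deriv (n k : Nat) :
    ((k : Int) + 1) * c (n+1) (k+1) = 2 * ((n : Int) + 1) * c n k := by
  have h := c_succ_pos n k
  have hE := hermite_ode n k
  rw [h]
  linear_combination -hE

-- ---- A's table equals the canonical table ----

theorem getLastD_map_range {α : Type} (f : Nat → α) (n : Nat) (d : α) :
    (((List.range (n+1)).map f).getLastD d) = f n := by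
  rw [List.range_succ]
  simp

theorem getD_two_zeros (m : Nat) : (([0, 0] : List Int)).getD m 0 = 0 := by
  rcases m with _ | _ | m <;> rfl

theorem pad_getD (l : List Int) (j : Nat) :
    PySem.List.pyGetD (l ++ [0, 0]) (j : Int) 0 = l.getD j 0 := by
  rw [PySem.List.pyGetD_natCast]
  by_cases h : j < l.length
  · rw [List.getD_eq_getElem _ _ (by simp; omega), List.getD_eq_getElem _ _ h,
      List.getElem_append_left h]
  · rw [List.getD_eq_default l _ (by omega)]
    rcases Nat.lt_or_ge j (l.length + 2) with h2 | h2
    · rw [List.getD_eq_getElem _ _ (by simp; omega),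
        List.getElem_append_right (by omega)]
      have := getD_two_zeros (j - l.length)
      rw [List.getD_eq_getElem _ _ (by simp; omega)] at this
      exact this
    · rw [List.getD_eq_default _ _ (by simp; omega)]

theorem A_row_eq (n : Nat) :
    [-(PySem.List.pyGetD (hrow n ++ [0, 0]) 1 0)]
      ++ (PySem.List.pyRange 1 ((n : Int) + 2) 1).map (fun k =>
           2 * PySem.List.pyGetD (hrow n ++ [0, 0]) (k - 1) 0
           - (k + 1) * PySem.List.pyGetD (hrow n ++ [0, 0]) (k + 1) 0)
      = hrow (n+1) := by
  rw [show hrow (n+1) = (List.range (n + 2)).map (fun k =>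
      (if 1 ≤ k then 2 * (hrow n).getD (k - 1) 0 else 0)
      - ((k : Int) + 1) * (hrow n).getD (k + 1) 0) from rfl]
  rw [List.range_succ_eq_map, PySem.List.pyRange_one]
  rw [show (((n : Int) + 2) - 1).toNat = n + 1 by omega]
  simp only [List.map_cons, List.map_map, List.cons_append, List.nil_append]
  congr 1
  · -- head entry: -a1[1] = hrow formula at k = 0
    have hp : PySem.List.pyGetD (hrow n ++ [0, 0]) ((1 : Nat) : Int) 0 = (hrow n).getD 1 0 :=
      pad_getD (hrow n) 1
    simp only [Nat.cast_one] at hp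
    rw [hp]
    simp
  · apply List.map_congr_left
    intro j _
    simp only [Function.comp]
    rw [show (1 : Int) + (j : Int) - 1 = ((j : Nat) : Int) by ring]
    rw [show (1 : Int) + (j : Int) + 1 = (((j + 2 : Nat)) : Int) by push_cast; ring]
    rw [pad_getD, pad_getD]
    rw [if_pos (show 1 ≤ j + 1 by omega)]
    push_cast
    ring

theorem Aux_eq_map_hrow (n : Nat) :
    H_coefficientsAux n = (List.range (n+1)).map hrow := by
  induction n with
  | zero => simp [H_coefficientsAux, hrow]
  | succ n IH =>
    have hstep : H_coefficientsAux (n+1) =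
        H_coefficientsAux n ++
          [(PySem.List.pyRange 1 ((n : Int) + 2) 1).foldl
            (fun a k => a ++
              [2 * PySem.List.pyGetD ((H_coefficientsAux n).getLastD [] ++ [0, 0]) (k - 1) 0
               - (k + 1) * PySem.List.pyGetD ((H_coefficientsAux n).getLastD [] ++ [0, 0]) (k + 1) 0])
            [-(PySem.List.pyGetD ((H_coefficientsAux n).getLastD [] ++ [0, 0]) 1 0)]] := rfl
    rw [hstep, IH, getLastD_map_range]
    rw [PySem.List.foldl_append_singleton_eq_map]
    rw [List.range_succ (n := n+1), List.map_append, List.map_cons, List.map_nil]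
    congr 1
    exact congrArg (fun x => [x]) (A_row_eq n)

-- ---- B's loop invariant ----

theorem alt_new_eq (m : Nat) :
    (PySem.List.pyRange 0 (((m : Int) + 2) + 1) 1).map (fun k =>
      (if 1 ≤ k then 2 * PySem.List.pyGetD (hrow (m+1)) (k - 1) 0 else 0)
      - 2 * (((m : Int) + 2) - 1) *
          (if k < ((hrow m).length : Int) then PySem.List.pyGetD (hrow m) k 0 else 0))
      = hrow (m+2) := by
  rw [show hrow (m+2) = (List.range (m + 3)).map (fun k =>
      (if 1 ≤ k then 2 * (hrow (m+1)).getD (k - 1) 0 else 0)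
      - ((k : Int) + 1) * (hrow (m+1)).getD (k + 1) 0) from rfl]
  rw [PySem.List.pyRange_one]
  rw [show (((m : Int) + 2 + 1) - 0).toNat = m + 3 by omega]
  rw [List.map_map]
  apply List.map_congr_left
  intro j _
  simp only [Function.comp, zero_add, length_hrow]
  have hderiv := hermite_deriv m j
  have hsnd : (if ((j : Int)) < ((m + 1 : Nat) : Int) then
      PySem.List.pyGetD (hrow m) ((j : Int)) 0 else 0) = c m j := by
    by_cases hj : j < m + 1
    · rw [if_pos (by exact_mod_cast hj), PySem.List.pyGetD_natCast]; rfl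
    · rw [if_neg (by exact_mod_cast hj), c_of_big (by omega)]
  cases j with
  | zero =>
    rw [hsnd]
    rw [if_neg (show ¬ ((1:Int) ≤ ((0 : Nat) : Int)) by simp)]
    rw [if_neg (show ¬ (1 ≤ 0) by omega)]
    simp only [Nat.cast_zero] at hderiv
    unfold c at hderiv hsnd ⊢
    push_cast at hderiv ⊢
    linear_combination hderiv
  | succ i =>
    rw [hsnd]
    rw [if_pos (show (1:Int) ≤ ((i + 1 : Nat) : Int) by push_cast; omega)]
    rw [if_pos (show 1 ≤ i + 1 by omega)]
    rw [show ((i + 1 : Nat) : Int) - 1 = ((i : Nat) : Int) by push_cast; ring]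
    rw [PySem.List.pyGetD_natCast]
    have hd2 := hermite_deriv m (i + 1)
    simp only [Nat.add_sub_cancel]
    unfold c at hd2 ⊢
    push_cast at hd2 ⊢
    linear_combination hd2

theorem alt_step_eq (m : Nat) :
    altStep ((List.range (m+2)).map hrow, hrow m, hrow (m+1)) ((m : Int) + 2)
      = ((List.range (m+3)).map hrow, hrow (m+1), hrow (m+2)) := by
  unfold altStep
  simp only
  have hnew := alt_new_eq m
  rw [hnew]
  rw [List.range_succ (n := m+2), List.map_append, List.map_cons, List.map_nil]

theorem alt_fold (m : Nat) :
    (PySem.List.pyRange 2 ((m : Int) + 2) 1).foldl altStep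
        (([[1], [0, 2]], [1], [0, 2]) : List (List Int) × List Int × List Int)
      = ((List.range (m+2)).map hrow, hrow m, hrow (m+1)) := by
  induction m with
  | zero =>
    rw [PySem.List.pyRange_one_eq_nil (by omega)]
    simp only [List.foldl_nil]
    refine congrArg₂ _ ?_ (congrArg₂ _ ?_ ?_) <;> decide
  | succ m IH =>
    rw [show (((m + 1 : Nat) : Int) + 2) = ((m : Int) + 2) + 1 by push_cast; ring,
      PySem.List.pyRange_one_succ_right (by omega), List.foldl_append, IH]
    simp only [List.foldl_cons, List.foldl_nil]
    exact alt_step_eq m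

-- ===== VERDICT (by name: the statement is the Claim_ definition above) =====
theorem H_coefficients_spec : Claim_equal_H_coefficients := by
  intro n _ hpre
  unfold Spec_H_coefficients H_coefficients H_coefficients_alt
  unfold Pre_H_coefficients at hpre
  by_cases h0 : n ≤ 0
  · have : n = 0 := le_antisymm h0 hpre
    subst this
    simp [H_coefficientsAux]
  · rw [if_neg h0]
    by_cases h1 : n = 1
    · subst h1
      rw [show ((1:Int) + 1) = 2 by ring, PySem.List.pyRange_one_eq_nil (by omega)]
      simp only [List.foldl_nil]
      rw [show ((1:Int)).toNat = 1 by rfl, Aux_eq_map_hrow]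
      decide
    · -- n ≥ 2 : n = m + 2
      obtain ⟨m, hm⟩ : ∃ m : Nat, n = (m : Int) + 2 := ⟨(n - 2).toNat, by omega⟩
      subst hm
      rw [show ((m:Int) + 2 + 1) = ((m + 1 : Nat) : Int) + 2 by push_cast; ring]
      rw [alt_fold (m+1)]
      rw [show ((m:Int) + 2).toNat = m + 2 by omega]
      rw [Aux_eq_map_hrow]
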